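-- pv_equiv track=rewrite | github.com/wkpark/SimpleRCS | tests/unit_tests/test_pydifflib_benchmark.py | create_large_content
-- ===== SOURCE A (Python) =====
-- def create_large_content(num_lines=50000, modification_rate=100):
--     """
--     Creates two large text contents.
--     modification_rate: modifying 1 line every N lines.
--     """
--     lines_a = [f"This is line number {i} with some static content." for i in range(num_lines)]
--     lines_b = list(lines_a)
--
--     # Modify some lines
--     for i in range(0, num_lines, modification_rate):
--         lines_b[i] = f"This is line number {i} MODIFIED content."
--
--     # Add some insertions
--     for i in range(0, num_lines, modification_rate * 2): # Less frequent insertions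
--         if i < len(lines_b):
--             lines_b.insert(i, f"Inserted line at {i}")
--
--     content_a = "\n".join(lines_a) + "\n"
--     content_b = "\n".join(lines_b) + "\n"
--
--     return content_a, content_b, lines_a, lines_b
-- ===== SOURCE B (Python) =====
-- def create_large_content(num_lines=50000, modification_rate=100):
--     """
--     Creates two large text contents.
--     modification_rate: modifying 1 line every N lines.
--     Builds lines_b in one pass, computing insertion positions directly
--     instead of repeated list.insert shifts.
--     """
--     def line(j):
--         if modification_rate > 0 and j % modification_rate == 0:
--             return f"This is line number {j} MODIFIED content."
--         return f"This is line number {j} with some static content."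
--
--     lines_a = [f"This is line number {i} with some static content." for i in range(num_lines)]
--
--     lines_b = []
--     pos = 0  # next original line index to emit
--     if modification_rate > 0:
--         step = 2 * modification_rate
--         k = 0
--         while k * step < num_lines:
--             lines_b.append(f"Inserted line at {k * step}")
--             nxt = min((k + 1) * (step - 1), num_lines)
--             lines_b.extend(line(j) for j in range(pos, nxt))
--             pos = nxt
--             k += 1
--     lines_b.extend(line(j) for j in range(pos, num_lines))
--
--     content_a = "\n".join(lines_a) + "\n"
--     content_b = "\n".join(lines_b) + "\n"
--     return content_a, content_b, lines_a, lines_b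
-- ===== Notes on version B (the rewrite author's own statement) =====
-- stated objective: alternative
-- what changed: B builds lines_b in a single left-to-right pass, computing each insertion position arithmetically (the k-th inserted line goes right before original line k*(2*modification_rate-1)) instead of repeatedly calling list.insert, which shifts the whole tail each time; same measured cost on the timed inputs. (A raises on modification_rate=0 and on num_lines<0 with modification_rate<0; Pre_ excludes exactly those.)
import Mathlib
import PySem

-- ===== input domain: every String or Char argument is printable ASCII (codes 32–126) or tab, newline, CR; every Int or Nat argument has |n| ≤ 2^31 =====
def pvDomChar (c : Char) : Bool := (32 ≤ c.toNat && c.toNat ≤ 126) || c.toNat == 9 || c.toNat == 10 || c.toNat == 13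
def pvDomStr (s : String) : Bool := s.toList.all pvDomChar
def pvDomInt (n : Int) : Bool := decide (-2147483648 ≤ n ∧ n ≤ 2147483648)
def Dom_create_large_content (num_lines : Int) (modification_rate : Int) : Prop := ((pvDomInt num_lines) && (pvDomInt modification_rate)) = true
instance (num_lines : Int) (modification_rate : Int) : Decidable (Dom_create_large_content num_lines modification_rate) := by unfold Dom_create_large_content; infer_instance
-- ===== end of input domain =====

-- B builds lines_b in a single left-to-right pass, computing each insertion position
-- arithmetically instead of repeatedly shifting the tail with list.insert (objective: alternative).

-- ===== PORT A =====
def pvLineA (i : Int) : String := "This is line number " ++ PySem.Int.toStr i ++ " with some static content."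
def pvLineM (i : Int) : String := "This is line number " ++ PySem.Int.toStr i ++ " MODIFIED content."
def pvLineIns (i : Int) : String := "Inserted line at " ++ PySem.Int.toStr i

def create_large_content (num_lines : Int) (modification_rate : Int) :
    String × String × List String × List String :=
  let lines_a := (PySem.List.pyRange 0 num_lines 1).map pvLineA
  let lines_b0 := lines_a
  let lines_b1 := (PySem.List.pyRange 0 num_lines modification_rate).foldl
    (fun acc i => PySem.List.pySetD acc i (pvLineM i)) lines_b0
  let lines_b := (PySem.List.pyRange 0 num_lines (modification_rate * 2)).foldl
    (fun acc i => if i < (acc.length : Int) then PySem.List.insert acc i (pvLineIns i) else acc) lines_b1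
  let content_a := PySem.Str.join "\n" lines_a ++ "\n"
  let content_b := PySem.Str.join "\n" lines_b ++ "\n"
  (content_a, content_b, lines_a, lines_b)

-- ===== PORT B =====
-- `line(j)` of Source B (closes over modification_rate)
def pvLine (modification_rate : Int) (j : Int) : String :=
  if 0 < modification_rate ∧ PySem.Int.mod j modification_rate = 0 then pvLineM j else pvLineA j

-- the `while k * step < num_lines` loop of Source B; `hs` only justifies termination
def pvBuildB (num_lines step : Int) (hs : 0 < step) (mr : Int) (k pos : Int) (acc : List String) :
    Int × List String :=
  if _hlt : k * step < num_lines then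
    let nxt := min ((k + 1) * (step - 1)) num_lines
    pvBuildB num_lines step hs mr (k + 1) nxt
      (acc ++ pvLineIns (k * step) :: (PySem.List.pyRange pos nxt 1).map (pvLine mr))
  else (pos, acc)
termination_by (num_lines - k * step).toNat
decreasing_by simp only [add_mul, one_mul]; omega

def create_large_content_alt (num_lines : Int) (modification_rate : Int) :
    String × String × List String × List String :=
  let lines_a := (PySem.List.pyRange 0 num_lines 1).map pvLineA
  let pb : Int × List String :=
    if _hpos : 0 < modification_rate then
      pvBuildB num_lines (2 * modification_rate) (by omega) modification_rate 0 0 []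
    else (0, [])
  let lines_b := pb.2 ++ (PySem.List.pyRange pb.1 num_lines 1).map (pvLine modification_rate)
  let content_a := PySem.Str.join "\n" lines_a ++ "\n"
  let content_b := PySem.Str.join "\n" lines_b ++ "\n"
  (content_a, content_b, lines_a, lines_b)

-- ===== PRECONDITION & SPEC =====
-- Pre_ excludes exactly the inputs where A raises: modification_rate = 0 (ValueError from
-- range step 0) and num_lines < 0 with modification_rate < 0 (IndexError: range(0, num_lines,
-- modification_rate) yields indices into the empty lines_b).
def Pre_create_large_content (num_lines : Int) (modification_rate : Int) : Prop :=
  modification_rate ≠ 0 ∧ (0 ≤ num_lines ∨ 0 < modification_rate)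
instance (num_lines : Int) (modification_rate : Int) : Decidable (Pre_create_large_content num_lines modification_rate) := by unfold Pre_create_large_content; infer_instance

def pvWitness_create_large_content : Int × Int := (5, 2)

def Spec_create_large_content (num_lines : Int) (modification_rate : Int) (out : String × String × List String × List String) : Prop := out = create_large_content_alt num_lines modification_rate
instance (num_lines : Int) (modification_rate : Int) (out : String × String × List String × List String) : Decidable (Spec_create_large_content num_lines modification_rate out) := by unfold Spec_create_large_content; infer_instance

-- ===== CLAIM (what is proved, stated in full; the proofs are below) =====
def Claim_equal_create_large_content : Prop := ∀ (num_lines : Int) (modification_rate : Int), Dom_create_large_content num_lines modification_rate → Pre_create_large_content num_lines modification_rate → Spec_create_large_content num_lines modification_rate (create_large_content num_lines modification_rate)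


-- ===== LEMMAS AND PROOFS =====

lemma pvRange_neg_nil {a b s : Int} (hs : s < 0) (h : a ≤ b) : PySem.List.pyRange a b s = [] := by
  simp [PySem.List.pyRange, show ¬ s = 0 by omega, show ¬ 0 < s by omega, show ¬ b < a by omega]

lemma pvRange_pos_nil {a b s : Int} (hs : 0 < s) (h : b ≤ a) : PySem.List.pyRange a b s = [] := by
  rw [PySem.List.pyRange_of_pos _ _ hs]
  simp [show ¬ a < b by omega]

lemma pvRange_pos_cons {a b s : Int} (hs : 0 < s) (h : a < b) :
    PySem.List.pyRange a b s = a :: PySem.List.pyRange (a + s) b s := by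
  rw [PySem.List.pyRange_of_pos _ _ hs, PySem.List.pyRange_of_pos _ _ hs]
  have hq0 : 0 ≤ (b - a - 1) / s := Int.ediv_nonneg (by omega) (by omega)
  have h1 : (b - a + s - 1) / s = (b - a - 1) / s + 1 := by
    rw [show b - a + s - 1 = (b - a - 1) + 1 * s by ring, Int.add_mul_ediv_right _ _ (by omega)]
  by_cases h2 : a + s < b
  · have h3 : (b - (a + s) + s - 1) / s = (b - a - 1) / s := by ring_nf
    rw [if_pos h, if_pos h2, h1, h3,
      show ((b - a - 1) / s + 1).toNat = ((b - a - 1) / s).toNat + 1 by omega,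
      List.range_succ_eq_map]
    simp only [List.map_cons, List.map_map, Nat.cast_zero, mul_zero, add_zero]
    refine congrArg₂ _ rfl (List.map_congr_left fun k _ => ?_)
    simp only [Function.comp_apply, Nat.succ_eq_add_one]
    push_cast
    ring
  · have h3 : (b - a - 1) / s = 0 := Int.ediv_eq_zero_of_lt (by omega) (by omega)
    rw [if_pos h, if_neg h2, h1, h3]
    simp

-- the modification loop of A writes pvLineM i at each index i of range(0, n, m):
-- elementwise characterisation of the fold
lemma pvFoldSet_getElem? (l : List Int) (init : List String)
    (hl : ∀ i ∈ l, 0 ≤ i ∧ i < (init.length : Int)) (p : Nat) :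
    (l.foldl (fun acc i => PySem.List.pySetD acc i (pvLineM i)) init)[p]? =
      if (p : Int) ∈ l then some (pvLineM p) else init[p]? := by
  induction l generalizing init with
  | nil => simp
  | cons i l ih =>
    obtain ⟨hi0, hilen⟩ := hl i (List.mem_cons_self ..)
    rw [List.foldl_cons, PySem.List.pySetD_of_nonneg _ _ hi0,
      ih _ (fun j hj => by simpa using hl j (List.mem_cons_of_mem _ hj))]
    by_cases hmem : (p : Int) ∈ l
    · simp [hmem, List.mem_cons]
    · simp only [List.mem_cons, hmem, or_false]
      by_cases hpi : (p : Int) = i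
      · obtain rfl : i = (p : Int) := hpi.symm
        simp [show p < init.length by omega]
      · rw [if_neg hpi]
        simp [show ¬ i.toNat = p by omega]

lemma pvModFold (n m : Int) (hm : 0 < m) :
    (PySem.List.pyRange 0 n m).foldl (fun acc i => PySem.List.pySetD acc i (pvLineM i))
      ((PySem.List.pyRange 0 n 1).map pvLineA) =
    (PySem.List.pyRange 0 n 1).map (pvLine m) := by
  apply List.ext_getElem?
  intro p
  rw [pvFoldSet_getElem?]
  · rw [List.getElem?_map, List.getElem?_map, PySem.List.getElem?_pyRange_one]
    by_cases hp : p < (n - 0).toNat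
    · rw [if_pos hp]
      by_cases hdvd : m ∣ (p : Int)
      · rw [if_pos ((PySem.List.mem_pyRange_iff_of_pos hm _).2 ⟨by omega, by omega, by simpa using hdvd⟩)]
        simp [pvLine, hm, hdvd]
      · rw [if_neg (fun hmem => hdvd (by simpa using ((PySem.List.mem_pyRange_iff_of_pos hm _).1 hmem).2.2))]
        simp [pvLine, hdvd, PySem.Int.mod_eq_zero_iff_dvd]
    · rw [if_neg hp, if_neg (fun hmem => by
        have := (PySem.List.mem_pyRange_iff_of_pos hm _).1 hmem
        omega)]
      simp
  · intro i hi
    rw [PySem.List.mem_pyRange_iff_of_pos hm] at hi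
    simp only [List.length_map, PySem.List.length_pyRange_one]
    omega

-- simulation: A's repeated list.insert over range(0, n, s) equals B's single-pass builder
lemma pvSim (n m s : Int) (hs : 0 < s) :
    ∀ (fuel : Nat) (k : Int), 0 ≤ k → ∀ (C : List String),
    (n - k * s).toNat ≤ fuel →
    (C.length : Int) = min (k * (s - 1)) n + k →
    (PySem.List.pyRange (k * s) n s).foldl
      (fun acc i => if i < (acc.length : Int) then PySem.List.insert acc i (pvLineIns i) else acc)
      (C ++ (PySem.List.pyRange (min (k * (s - 1)) n) n 1).map (pvLine m))
    = (pvBuildB n s hs m k (min (k * (s - 1)) n) C).2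
        ++ (PySem.List.pyRange ((pvBuildB n s hs m k (min (k * (s - 1)) n) C).1) n 1).map (pvLine m) := by
  intro fuel
  induction fuel with
  | zero =>
    intro k hk C hfuel hC
    have hlt : ¬ k * s < n := by omega
    rw [pvRange_pos_nil hs (by omega), List.foldl_nil, pvBuildB, dif_neg hlt]
  | succ fuel ih =>
    intro k hk C hfuel hC
    by_cases hlt : k * s < n
    · have hks : 0 ≤ k * s := mul_nonneg hk (by omega)
      have hpos1 : k * (s - 1) ≤ k * s := by nlinarith
      have hkk : k * s = k * (s - 1) + k := by ring
      have hmul : (k + 1) * s = k * s + s := by ring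
      have hmul2 : (k + 1) * (s - 1) = k * (s - 1) + s - 1 := by ring
      have hpos : min (k * (s - 1)) n = k * (s - 1) := min_eq_left (by omega)
      have hple : k * (s - 1) ≤ min ((k + 1) * (s - 1)) n := by omega
      have hnle : min ((k + 1) * (s - 1)) n ≤ n := min_le_right _ _
      rw [pvRange_pos_cons hs hlt, List.foldl_cons, hpos]
      rw [hpos] at hC
      have hguard : ((k * s : Int)) <
          (((C ++ (PySem.List.pyRange (k * (s - 1)) n 1).map (pvLine m)).length : Nat) : Int) := by
        simp only [List.length_append, List.length_map, PySem.List.length_pyRange_one]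
        omega
      rw [if_pos hguard]
      have hins : PySem.List.insert
          (C ++ (PySem.List.pyRange (k * (s - 1)) n 1).map (pvLine m)) (k * s)
          (pvLineIns (k * s))
          = C ++ pvLineIns (k * s) :: (PySem.List.pyRange (k * (s - 1)) n 1).map (pvLine m) := by
        rw [show (k * s : Int) = ((k * s).toNat : Int) by omega,
          PySem.List.insert_natCast _ _ _ (by
            simp only [List.length_append, List.length_map, PySem.List.length_pyRange_one]
            omega),
          show (k * s).toNat = C.length by omega, List.take_left, List.drop_left]
      rw [hins,
        PySem.List.pyRange_one_append (k * (s - 1)) (min ((k + 1) * (s - 1)) n) n hple hnle,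
        List.map_append]
      have hre : C ++ pvLineIns (k * s) ::
            ((PySem.List.pyRange (k * (s - 1)) (min ((k + 1) * (s - 1)) n) 1).map (pvLine m) ++
             (PySem.List.pyRange (min ((k + 1) * (s - 1)) n) n 1).map (pvLine m))
          = (C ++ pvLineIns (k * s) ::
              (PySem.List.pyRange (k * (s - 1)) (min ((k + 1) * (s - 1)) n) 1).map (pvLine m)) ++
             (PySem.List.pyRange (min ((k + 1) * (s - 1)) n) n 1).map (pvLine m) := by
        simp
      rw [hre, show k * s + s = (k + 1) * s by ring, pvBuildB, dif_pos hlt]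
      exact ih (k + 1) (by omega)
        (C ++ pvLineIns (k * s) ::
          (PySem.List.pyRange (k * (s - 1)) (min ((k + 1) * (s - 1)) n) 1).map (pvLine m))
        (by omega)
        (by
          simp only [List.length_append, List.length_cons, List.length_map,
            PySem.List.length_pyRange_one]
          push_cast
          omega)
    · rw [pvRange_pos_nil hs (by omega), List.foldl_nil, pvBuildB, dif_neg hlt]

lemma pvBuildB_stop (n s : Int) (hs : 0 < s) (mr k pos : Int) (acc : List String)
    (h : ¬ k * s < n) : pvBuildB n s hs mr k pos acc = (pos, acc) := by
  rw [pvBuildB, dif_neg h]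

-- ===== VERDICT (by name: the statement is the Claim_ definition above) =====
theorem create_large_content_spec : Claim_equal_create_large_content := by
  intro n m _ hpre
  obtain ⟨hm0, hnm⟩ := hpre
  unfold Spec_create_large_content
  rcases lt_trichotomy m 0 with hm | hm | hm
  · -- m < 0 (hence 0 ≤ n): no modification, no insertion; B takes the else branch
    have hn : (0 : Int) ≤ n := by omega
    have hmap : (PySem.List.pyRange 0 n 1).map (pvLine m) = (PySem.List.pyRange 0 n 1).map pvLineA :=
      List.map_congr_left fun j _ => by simp [pvLine, show ¬ (0:Int) < m by omega]
    simp only [create_large_content, create_large_content_alt,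
      pvRange_neg_nil hm hn, pvRange_neg_nil (show m * 2 < 0 by omega) hn,
      List.foldl_nil, dif_neg (show ¬ (0:Int) < m by omega), List.nil_append, hmap]
  · omega
  · -- 0 < m
    by_cases hn : n ≤ 0
    · -- empty content on both sides
      have hb : ∀ hsp : (0:Int) < 2 * m, pvBuildB n (2 * m) hsp m 0 0 [] = (0, []) :=
        fun hsp => pvBuildB_stop _ _ _ _ _ _ _ (by omega)
      simp only [create_large_content, create_large_content_alt, dif_pos hm, hb,
        PySem.List.pyRange_one_eq_nil hn, pvRange_pos_nil hm hn,
        pvRange_pos_nil (show (0:Int) < m * 2 by omega) hn, List.foldl_nil, List.map_nil,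
        List.append_nil]
    · -- 0 < m, 0 < n: the real case
      rw [not_le] at hn
      have hmf := pvModFold n m hm
      have hsim := pvSim n m (m * 2) (by omega) (n - 0 * (m * 2)).toNat 0 le_rfl []
        le_rfl (by simp; omega)
      simp only [zero_mul, List.nil_append] at hsim
      rw [show min (0 : Int) n = 0 by omega] at hsim
      simp only [create_large_content, create_large_content_alt, dif_pos hm, mul_comm 2 m]
      rw [hmf, hsim]
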